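-- pv_equiv track=rewrite | github.com/jorgepauloS/UFRPE | AED/garrafas_ver3.py | tomar
-- ===== SOURCE A (Python) =====
-- def tomar(cheias, emprestado):
--     vazias = 0
--     vazias += cheias
--     vazias += emprestado
--     tomadas = cheias
--     if vazias > 3:
--         cheias = (vazias//3)
--         vazias = (vazias%3)
--         var1, var2 = tomar(cheias,vazias)
--         tomadas += var1
--         return tomadas, vazias
--     elif vazias ==3:
--         cheias = (vazias//3)
--         vazias = (vazias%3)
--         var1, var2 = tomar(cheias,vazias)
--         tomadas += var1
--         return tomadas, vazias
--     else:
--         tomadas += vazias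
--         return tomadas, vazias
-- ===== SOURCE B (Python) =====
-- def tomar(cheias, emprestado):
--     v0 = cheias + emprestado
--     total = 0
--     c, e = cheias, emprestado
--     while True:
--         v = c + e
--         total += c
--         if v >= 3:
--             c, e = v // 3, v % 3
--         else:
--             total += v
--             break
--     return total, (v0 % 3 if v0 >= 3 else v0)
-- ===== Notes on version B (the rewrite author's own statement) =====
-- stated objective: alternative
-- what changed: Replaces the recursion with an explicit iterative loop over (full, empty) state and a running total; the returned remainder is computed once from the original sum instead of from the top recursive frame.
import Mathlib
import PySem

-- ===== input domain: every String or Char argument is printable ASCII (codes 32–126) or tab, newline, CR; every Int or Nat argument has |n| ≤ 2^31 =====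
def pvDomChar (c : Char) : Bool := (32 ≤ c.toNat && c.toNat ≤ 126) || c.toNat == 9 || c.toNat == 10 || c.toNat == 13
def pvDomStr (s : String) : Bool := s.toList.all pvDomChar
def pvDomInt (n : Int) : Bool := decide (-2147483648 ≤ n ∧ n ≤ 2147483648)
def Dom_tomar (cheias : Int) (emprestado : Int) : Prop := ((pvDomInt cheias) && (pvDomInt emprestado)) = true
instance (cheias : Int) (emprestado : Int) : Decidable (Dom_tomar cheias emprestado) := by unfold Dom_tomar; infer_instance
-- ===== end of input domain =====

-- B replaces A's recursion by an explicit iterative loop with a running total (alternative decomposition, same cost).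
-- Both ports use a fuel parameter only to make the recursion structural; (cheias+emprestado).toNat + 1 steps always suffice
-- (the sum strictly decreases on each recursive step), so the fuel never runs out on any input.

-- ===== PORT A =====
-- literal port of A's recursion (vazias = 0 + cheias + emprestado, three branches); fuel-0 value is never reached
def tomarFuel : Nat → Int → Int → Int × Int
  | 0, _, _ => (0, 0)
  | n + 1, cheias, emprestado =>
    let vazias : Int := 0 + cheias + emprestado
    let tomadas : Int := cheias
    if vazias > 3 then
      let c := PySem.Int.floordiv vazias 3
      let v := PySem.Int.mod vazias 3
      let r := tomarFuel n c v
      (tomadas + r.1, v)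
    else if vazias = 3 then
      let c := PySem.Int.floordiv vazias 3
      let v := PySem.Int.mod vazias 3
      let r := tomarFuel n c v
      (tomadas + r.1, v)
    else
      (tomadas + vazias, vazias)

def tomar (cheias : Int) (emprestado : Int) : Int × Int :=
  tomarFuel ((cheias + emprestado).toNat + 1) cheias emprestado

-- ===== PORT B =====
-- the while-loop of Source B, state (c, e, total); fuel-0 returns the accumulator (never reached)
def tomarLoopFuel : Nat → Int → Int → Int → Int
  | 0, _, _, total => total
  | n + 1, c, e, total =>
    if c + e ≥ 3 then
      tomarLoopFuel n (PySem.Int.floordiv (c + e) 3) (PySem.Int.mod (c + e) 3) (total + c)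
    else
      total + c + (c + e)

def tomar_alt (cheias : Int) (emprestado : Int) : Int × Int :=
  let v0 := cheias + emprestado
  (tomarLoopFuel ((cheias + emprestado).toNat + 1) cheias emprestado 0,
   if v0 ≥ 3 then PySem.Int.mod v0 3 else v0)

-- ===== PRECONDITION & SPEC =====
def Spec_tomar (cheias : Int) (emprestado : Int) (out : Int × Int) : Prop := out = tomar_alt cheias emprestado
instance (cheias : Int) (emprestado : Int) (out : Int × Int) : Decidable (Spec_tomar cheias emprestado out) := by unfold Spec_tomar; infer_instance

-- ===== CLAIM (what is proved, stated in full; the proofs are below) =====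
def Claim_equal_tomar : Prop := ∀ (cheias : Int) (emprestado : Int), Dom_tomar cheias emprestado → Spec_tomar cheias emprestado (tomar cheias emprestado)

-- ===== LEMMAS AND PROOFS =====

-- with the chosen fuel-0 values, the loop equals the accumulator plus A's first component at EVERY fuel
theorem tomarLoopFuel_eq (n : Nat) : ∀ (c e total : Int),
    tomarLoopFuel n c e total = total + (tomarFuel n c e).1 := by
  induction n with
  | zero => intro c e total; simp [tomarLoopFuel, tomarFuel]
  | succ n ih =>
      intro c e total
      rw [tomarLoopFuel, tomarFuel]
      simp only [zero_add]
      by_cases h3 : c + e > 3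
      · rw [if_pos (by omega), if_pos h3, ih]; ring
      · by_cases he : c + e = 3
        · rw [if_pos (by omega), if_neg h3, if_pos he, ih]; ring
        · rw [if_neg (by omega), if_neg h3, if_neg he]; ring

-- A's second component in closed form (any positive fuel)
theorem tomarFuel_snd (n : Nat) (c e : Int) :
    (tomarFuel (n + 1) c e).2 = if c + e ≥ 3 then PySem.Int.mod (c + e) 3 else c + e := by
  rw [tomarFuel]
  simp only [zero_add]
  by_cases h3 : c + e > 3
  · rw [if_pos h3, if_pos (by omega)]
  · by_cases he : c + e = 3
    · rw [if_neg h3, if_pos he, if_pos (by omega)]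
    · rw [if_neg h3, if_neg he, if_neg (by omega)]

-- ===== VERDICT (by name: the statement is the Claim_ definition above) =====
theorem tomar_spec : Claim_equal_tomar := by
  intro cheias emprestado _
  unfold Spec_tomar tomar tomar_alt
  refine Prod.ext ?_ ?_
  · simp [tomarLoopFuel_eq]
  · simpa using tomarFuel_snd ((cheias + emprestado).toNat) cheias emprestado
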